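-- pv_equiv track=rewrite | github.com/mhendzel2/ImageBiophysics | data_loader.py | _extract_channel_colors
-- ===== SOURCE A (Python) =====
-- from typing import Dict, Any, Optional, Union, List
--
-- def _extract_channel_colors(metadata: Dict, num_channels: int) -> List[str]:
--     """Extract channel colors from metadata or assign defaults"""
--
--     # Default color scheme for up to 10 channels
--     default_colors = [
--         '#FF0000',  # Red
--         '#00FF00',  # Green
--         '#0000FF',  # Blue
--         '#FFFF00',  # Yellow
--         '#FF00FF',  # Magenta
--         '#00FFFF',  # Cyan
--         '#FFA500',  # Orange
--         '#800080',  # Purple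
--         '#FFC0CB',  # Pink
--         '#A52A2A'   # Brown
--     ]
--
--     channel_colors = []
--
--     # Try to extract from metadata
--     if 'channel_colors' in metadata and isinstance(metadata['channel_colors'], list):
--         channel_colors = metadata['channel_colors'][:num_channels]
--     elif 'ChannelColors' in metadata and isinstance(metadata['ChannelColors'], list):
--         channel_colors = metadata['ChannelColors'][:num_channels]
--
--     # Fill with defaults if needed
--     while len(channel_colors) < num_channels:
--         color_idx = len(channel_colors) % len(default_colors)
--         channel_colors.append(default_colors[color_idx])
--
--     return channel_colors[:num_channels]
-- ===== SOURCE B (Python) =====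
-- from typing import Dict, List
--
-- def _extract_channel_colors(metadata: Dict, num_channels: int) -> List[str]:
--     """Extract channel colors from metadata or assign defaults.
--
--     Builds the padding in bulk: rotate the default palette to the starting
--     offset, replicate it with list multiplication and slice to the needed
--     length, instead of appending one element per loop iteration."""
--     default_colors = [
--         '#FF0000', '#00FF00', '#0000FF', '#FFFF00', '#FF00FF',
--         '#00FFFF', '#FFA500', '#800080', '#FFC0CB', '#A52A2A'
--     ]
--     src = metadata.get('channel_colors')
--     if not isinstance(src, list):
--         src = metadata.get('ChannelColors')
--     if not isinstance(src, list):
--         src = []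
--     n = max(num_channels, 0)
--     taken = src[:n]
--     need = n - len(taken)
--     r = len(taken) % len(default_colors)
--     rotated = default_colors[r:] + default_colors[:r]
--     reps = (need + len(default_colors) - 1) // len(default_colors)
--     return taken + (rotated * reps)[:need]
-- ===== Notes on version B (the rewrite author's own statement) =====
-- stated objective: alternative
-- what changed: Replaces A's element-by-element while-loop (append defaults[len % 10] until long enough, then re-slice) with bulk list construction: clamp the count, take the prefix of the source, rotate the default palette to the start offset, replicate it by list multiplication and slice the pad to the exact length needed.
-- intended difference: For negative num_channels with a metadata color list longer than -2*num_channels, A's two negative slices return a nonempty truncated list, while B returns [], the intended result for a nonpositive channel count. — e.g. on _extract_channel_colors([("channel_colors", ["a", "b", "c"])], -1): A returns ["a"], B returns []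
import Mathlib
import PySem

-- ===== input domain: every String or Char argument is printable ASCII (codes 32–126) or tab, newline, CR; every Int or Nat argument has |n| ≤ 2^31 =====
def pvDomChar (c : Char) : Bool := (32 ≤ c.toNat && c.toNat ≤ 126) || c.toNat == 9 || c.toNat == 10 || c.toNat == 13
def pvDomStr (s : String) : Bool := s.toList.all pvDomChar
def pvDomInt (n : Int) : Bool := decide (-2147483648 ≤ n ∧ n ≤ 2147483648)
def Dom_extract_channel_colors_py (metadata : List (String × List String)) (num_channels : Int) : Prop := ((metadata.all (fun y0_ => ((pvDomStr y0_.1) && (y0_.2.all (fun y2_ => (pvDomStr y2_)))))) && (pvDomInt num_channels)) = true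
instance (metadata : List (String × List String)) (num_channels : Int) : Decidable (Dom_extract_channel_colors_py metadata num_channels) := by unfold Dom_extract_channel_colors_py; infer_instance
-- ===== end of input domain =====

-- B builds the default padding in bulk (rotate the palette, replicate, slice) instead of A's
-- per-element while-append loop (objective: alternative; return value only, no mutation).

-- the default_colors list, literal data shared by both Pythons
def pvDefaults : List String :=
  ["#FF0000", "#00FF00", "#0000FF", "#FFFF00", "#FF00FF",
   "#00FFFF", "#FFA500", "#800080", "#FFC0CB", "#A52A2A"]

-- ===== PORT A =====
-- the 'while len(channel_colors) < num_channels:' loop of A, appending defaults by index mod 10;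
-- the appended suffix is accumulated reversed (cons) and reversed at the end — the standard
-- linear-time encoding of Python's O(1) list.append; j tracks len(channel_colors)
def pvFillGo (n : Int) (j : Nat) (acc : List String) : List String :=
  if (j : Int) < n then
    pvFillGo n (j + 1) (PySem.List.pyGetD pvDefaults (PySem.Int.mod (j : Int) 10) "" :: acc)
  else acc.reverse
termination_by (n - j).toNat
decreasing_by simp_all; omega

def pvFill (n : Int) (cc : List String) : List String := cc ++ pvFillGo n cc.length []

def extract_channel_colors_py (metadata : List (String × List String)) (num_channels : Int) : List String :=
  -- dict membership/lookup = first match on the association list; isinstance(…, list) is always true under the type convention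
  let channel_colors : List String :=
    if (metadata.lookup "channel_colors").isSome then
      PySem.List.slice ((metadata.lookup "channel_colors").getD []) none (some num_channels)
    else if (metadata.lookup "ChannelColors").isSome then
      PySem.List.slice ((metadata.lookup "ChannelColors").getD []) none (some num_channels)
    else []
  PySem.List.slice (pvFill num_channels channel_colors) none (some num_channels)

-- ===== PORT B =====
-- the metadata.get chain of Source B (isinstance(…, list) is always true under the type convention)
def pvResolveSrc (metadata : List (String × List String)) : List String :=
  if (metadata.lookup "channel_colors").isSome then (metadata.lookup "channel_colors").getD []
  else if (metadata.lookup "ChannelColors").isSome then (metadata.lookup "ChannelColors").getD []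
  else []

def extract_channel_colors_py_alt (metadata : List (String × List String)) (num_channels : Int) : List String :=
  let src := pvResolveSrc metadata
  let n : Nat := (max num_channels 0).toNat      -- n = max(num_channels, 0)
  let taken := src.take n                        -- src[:n], n ≥ 0
  let need := n - taken.length
  let r := taken.length % 10
  let rotated := pvDefaults.drop r ++ pvDefaults.take r
  let reps := (need + 9) / 10                    -- (need + 10 - 1) // 10, nonneg
  taken ++ ((List.replicate reps rotated).flatten).take need   -- rotated * reps, sliced [:need]

-- ===== PRECONDITION & SPEC =====
-- For negative num_channels with a metadata color list longer than -2*num_channels, A's two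
-- negative slices return a nonempty truncated list, while B returns [], the intended result
-- for a nonpositive channel count.
def D_extract_channel_colors_py (metadata : List (String × List String)) (num_channels : Int) : Prop :=
  num_channels < 0 ∧
  0 < (((metadata.lookup "channel_colors").getD ((metadata.lookup "ChannelColors").getD [])).length : Int) + 2 * num_channels
instance (metadata : List (String × List String)) (num_channels : Int) : Decidable (D_extract_channel_colors_py metadata num_channels) := by unfold D_extract_channel_colors_py; infer_instance

def Spec_extract_channel_colors_py (metadata : List (String × List String)) (num_channels : Int) (out : List String) : Prop := ¬ D_extract_channel_colors_py metadata num_channels → out = extract_channel_colors_py_alt metadata num_channels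
instance (metadata : List (String × List String)) (num_channels : Int) (out : List String) : Decidable (Spec_extract_channel_colors_py metadata num_channels out) := by unfold Spec_extract_channel_colors_py; infer_instance

def pvDiffWitness_extract_channel_colors_py : (List (String × List String)) × Int :=
  ([("channel_colors", ["a", "b", "c"])], -1)
def pvDiffWitnessOut_extract_channel_colors_py : (List String) × (List String) := (["a"], [])

-- ===== CLAIM (what is proved, stated in full; the proofs are below) =====
def Claim_unchanged_extract_channel_colors_py : Prop := ∀ (metadata : List (String × List String)) (num_channels : Int), Dom_extract_channel_colors_py metadata num_channels → Spec_extract_channel_colors_py metadata num_channels (extract_channel_colors_py metadata num_channels)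
def Claim_changed_extract_channel_colors_py : Prop := Dom_extract_channel_colors_py (pvDiffWitness_extract_channel_colors_py.1) (pvDiffWitness_extract_channel_colors_py.2) ∧ D_extract_channel_colors_py (pvDiffWitness_extract_channel_colors_py.1) (pvDiffWitness_extract_channel_colors_py.2) ∧ extract_channel_colors_py (pvDiffWitness_extract_channel_colors_py.1) (pvDiffWitness_extract_channel_colors_py.2) = pvDiffWitnessOut_extract_channel_colors_py.1 ∧ extract_channel_colors_py_alt (pvDiffWitness_extract_channel_colors_py.1) (pvDiffWitness_extract_channel_colors_py.2) = pvDiffWitnessOut_extract_channel_colors_py.2 ∧ pvDiffWitnessOut_extract_channel_colors_py.1 ≠ pvDiffWitnessOut_extract_channel_colors_py.2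
def Claim_exact_extract_channel_colors_py : Prop := ∀ (metadata : List (String × List String)) (num_channels : Int), Dom_extract_channel_colors_py metadata num_channels → D_extract_channel_colors_py metadata num_channels → extract_channel_colors_py metadata num_channels ≠ extract_channel_colors_py_alt metadata num_channels

-- ===== LEMMAS AND PROOFS =====

theorem fillGo_spec (n : Int) (j : Nat) (acc : List String) :
    pvFillGo n j acc = acc.reverse ++ (PySem.List.pyRange (j : Int) n 1).map
      (fun i => PySem.List.pyGetD pvDefaults (PySem.Int.mod i 10) "") := by
  rw [pvFillGo]
  split
  · rename_i h
    rw [fillGo_spec n (j + 1)]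
    rw [PySem.List.pyRange_one_cons h]
    push_cast
    simp
  · rename_i h
    rw [PySem.List.pyRange_one_eq_nil (by omega)]
    simp
termination_by (n - j).toNat
decreasing_by simp_all; omega

theorem fill_spec (n : Int) (cc : List String) :
    pvFill n cc = cc ++ (PySem.List.pyRange (cc.length : Int) n 1).map
      (fun i => PySem.List.pyGetD pvDefaults (PySem.Int.mod i 10) "") := by
  rw [pvFill, fillGo_spec]
  simp

-- the rotated palette, elementwise: rot[k] = defaults[(r+k) % 10]
theorem rot_eq (r : Nat) (hr : r < 10) :
    pvDefaults.drop r ++ pvDefaults.take r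
      = (List.range 10).map (fun k => pvDefaults.getD ((r + k) % 10) "") := by
  interval_cases r <;> decide

-- bulk replication, elementwise
theorem flatten_replicate_rot (m r : Nat) (hr : r < 10) :
    (List.replicate m (pvDefaults.drop r ++ pvDefaults.take r)).flatten
      = (List.range (m * 10)).map (fun k => pvDefaults.getD ((r + k) % 10) "") := by
  induction m with
  | zero => simp
  | succ m ih =>
    rw [List.replicate_succ', List.flatten_append, ih]
    have hrng : List.range ((m + 1) * 10) = List.range (m * 10) ++ (List.range 10).map (m * 10 + ·) := by
      have : (m + 1) * 10 = m * 10 + 10 := by ring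
      rw [this, List.range_add]
    rw [hrng, List.map_append, List.map_map]
    congr 1
    simp only [List.flatten_cons, List.flatten_nil, List.append_nil]
    rw [rot_eq r hr]
    apply List.map_congr_left
    intro k hk
    simp only [Function.comp]
    congr 1
    omega

theorem slice_nil_to (n : Int) : PySem.List.slice ([] : List String) none (some n) = [] := by
  rcases (by omega : 0 ≤ n ∨ n < 0) with h | h
  · rw [PySem.List.slice_to _ h]; simp
  · have hk : n = -(((-n).toNat : Nat) : Int) := by omega
    rw [hk, PySem.List.slice_to_neg_natCast _ _ (by omega)]; simp

theorem core (src : List String) (n : Int)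
    (h : ¬ (n < 0 ∧ 0 < (src.length : Int) + 2 * n)) :
    PySem.List.slice (pvFill n (PySem.List.slice src none (some n))) none (some n)
      = (src.take (max n 0).toNat) ++
        ((List.replicate (((max n 0).toNat - (src.take (max n 0).toNat).length + 9) / 10)
            (pvDefaults.drop ((src.take (max n 0).toNat).length % 10)
              ++ pvDefaults.take ((src.take (max n 0).toNat).length % 10))).flatten).take
          ((max n 0).toNat - (src.take (max n 0).toNat).length) := by
  rcases (by omega : 0 ≤ n ∨ n < 0) with hn | hn
  · -- n ≥ 0
    obtain ⟨N, rfl⟩ : ∃ N : Nat, n = (N : Int) := ⟨n.toNat, by omega⟩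
    have hmax : (max (N : Int) 0).toNat = N := by omega
    rw [hmax]
    have hsl : PySem.List.slice src none (some (N : Int)) = src.take N :=
      PySem.List.slice_to_natCast src N
    rw [hsl]
    set cc := src.take N with hcc
    have hccN : cc.length ≤ N := by simp [hcc]
    set need := N - cc.length with hneed
    set r := cc.length % 10 with hr
    rw [fill_spec]
    -- both sides are cc ++ (map of the cyclic defaults over `need` positions)
    have hA : (PySem.List.pyRange (cc.length : Int) (N : Int) 1).map
        (fun i => PySem.List.pyGetD pvDefaults (PySem.Int.mod i 10) "")
        = (List.range need).map (fun k => pvDefaults.getD ((cc.length + k) % 10) "") := by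
      rw [PySem.List.pyRange_one]
      have hsub : ((N : Int) - (cc.length : Int)).toNat = need := by omega
      rw [hsub, List.map_map]
      apply List.map_congr_left
      intro k _
      simp only [Function.comp]
      have h1 : ((cc.length : Int) + (k : Int)) = ((cc.length + k : Nat) : Int) := by push_cast; ring
      rw [h1, PySem.Int.mod_eq_emod_of_pos (by norm_num)]
      have h2 : (((cc.length + k : Nat) : Int)) % 10 = (((cc.length + k) % 10 : Nat) : Int) := by
        norm_cast
      rw [h2, PySem.List.pyGetD_natCast]
    rw [hA]
    have hB : ((List.replicate ((need + 9) / 10)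
          (pvDefaults.drop r ++ pvDefaults.take r)).flatten).take need
        = (List.range need).map (fun k => pvDefaults.getD ((cc.length + k) % 10) "") := by
      rw [flatten_replicate_rot _ r (by omega)]
      rw [← List.map_take, List.take_range]
      have hmin : min need ((need + 9) / 10 * 10) = need := by omega
      rw [hmin]
      apply List.map_congr_left
      intro k _
      congr 1
      omega
    rw [hB]
    -- final slice of A is the identity: the filled list has length N
    rw [PySem.List.slice_to_natCast]
    apply List.take_of_length_le
    simp
    omega
  · -- n < 0 : both sides empty
    have hlen2 : (src.length : Int) + 2 * n ≤ 0 := by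
      by_contra hc; exact h ⟨hn, by omega⟩
    have hmax : (max n 0).toNat = 0 := by omega
    rw [hmax]
    simp only [List.take_zero, Nat.zero_sub, List.take_zero, List.nil_append]
    have hk : n = -(((-n).toNat : Nat) : Int) := by omega
    have hkpos : 0 < (-n).toNat := by omega
    rw [hk, PySem.List.slice_to_neg_natCast _ _ hkpos]
    rw [fill_spec, PySem.List.pyRange_one_eq_nil (by omega), List.map_nil, List.append_nil]
    rw [PySem.List.slice_to_neg_natCast _ _ hkpos]
    have : (List.take (src.length - (-n).toNat) src).length - (-n).toNat = 0 := by
      simp; omega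
    rw [this]
    simp

theorem tight_core (src : List String) (n : Int) (hn : n < 0)
    (hlen : 0 < (src.length : Int) + 2 * n) :
    PySem.List.slice (pvFill n (PySem.List.slice src none (some n))) none (some n) ≠ [] := by
  have hk : n = -(((-n).toNat : Nat) : Int) := by omega
  have hkpos : 0 < (-n).toNat := by omega
  rw [hk, PySem.List.slice_to_neg_natCast _ _ hkpos]
  rw [fill_spec, PySem.List.pyRange_one_eq_nil (by omega), List.map_nil, List.append_nil]
  rw [PySem.List.slice_to_neg_natCast _ _ hkpos]
  intro hcontra
  have := congrArg List.length hcontra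
  simp at this
  omega

theorem alt_neg (metadata : List (String × List String)) (n : Int) (hn : n < 0) :
    extract_channel_colors_py_alt metadata n = [] := by
  unfold extract_channel_colors_py_alt
  have hmax : (max n 0).toNat = 0 := by omega
  simp [hmax]

-- ===== VERDICT (by name: the statement is the Claim_ definition above) =====
theorem extract_channel_colors_py_spec : Claim_unchanged_extract_channel_colors_py := by
  intro metadata n _ hD
  unfold extract_channel_colors_py extract_channel_colors_py_alt pvResolveSrc
  unfold D_extract_channel_colors_py at hD
  rcases h1 : metadata.lookup "channel_colors" with _ | v1
  · rcases h2 : metadata.lookup "ChannelColors" with _ | v2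
    · simp only [h1, h2, Option.isSome_none, Bool.false_eq_true, if_false, Option.getD_none]
      have h := core [] n (by rintro ⟨hx, hy⟩; simp at hy; omega)
      rw [slice_nil_to] at h
      exact h
    · simp only [h1, h2, Option.isSome_none, Option.isSome_some, Bool.false_eq_true, if_false,
        if_true, Option.getD_some]
      exact core v2 n (by rw [h1, h2] at hD; simp only [Option.getD_none, Option.getD_some] at hD; exact hD)
  · simp only [h1, Option.isSome_some, if_true, Option.getD_some]
    exact core v1 n (by rw [h1] at hD; simp only [Option.getD_some] at hD; exact hD)

theorem extract_channel_colors_py_changed : Claim_changed_extract_channel_colors_py := by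
  unfold Claim_changed_extract_channel_colors_py
  refine ⟨by decide, by decide, ?_, by decide, by decide⟩
  show extract_channel_colors_py [("channel_colors", ["a", "b", "c"])] (-1) = ["a"]
  unfold extract_channel_colors_py
  norm_num
  rw [show PySem.List.slice ["a", "b", "c"] none (some (-1)) = ["a", "b"] from by decide]
  rw [show pvFill (-1) ["a", "b"] = ["a", "b"] from by unfold pvFill; rw [pvFillGo]; norm_num]
  decide

theorem extract_channel_colors_py_tight : Claim_exact_extract_channel_colors_py := by
  intro metadata n _ hD
  unfold D_extract_channel_colors_py at hD
  obtain ⟨hn, hlen⟩ := hD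
  rw [alt_neg metadata n hn]
  unfold extract_channel_colors_py
  rcases h1 : metadata.lookup "channel_colors" with _ | v1
  · rcases h2 : metadata.lookup "ChannelColors" with _ | v2
    · rw [h1, h2] at hlen; simp at hlen; omega
    · simp only [h1, h2, Option.isSome_none, Option.isSome_some, Bool.false_eq_true, if_false,
        if_true, Option.getD_some]
      exact tight_core v2 n hn (by rw [h1, h2] at hlen; simpa using hlen)
  · simp only [h1, Option.isSome_some, if_true, Option.getD_some]
    exact tight_core v1 n hn (by rw [h1] at hlen; simpa using hlen)
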